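-- pv_equiv track=rewrite | github.com/clasesucatmarlon/AirBnB_clone | console.py | pre_parse
-- ===== SOURCE A (Python) =====
-- def pre_parse(arg, quoating=False):
--     '''
--         Return method name and argument parsed
--     '''
--     method, value = "", ""
--     flag = False
--
--     if not arg:
--         return (False, False)
--     if arg[-1] == ')':
--         for char in arg:
--             if char == '(' or char == ')':
--                 flag = True
--                 continue
--             if flag is True:
--                 if not quoating:
--                     if char == '"':
--                         continue
--                 value += char
--             if flag is False:
--                 method += char
--
--     return (method, value)
-- ===== SOURCE B (Python) =====
-- def pre_parse(arg, quoating=False):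
--     if not arg:
--         return (False, False)
--     if arg[-1] != ')':
--         return ("", "")
--     i = min(k for k, c in enumerate(arg) if c in '()')
--     method = arg[:i]
--     value = ''.join(c for c in arg[i + 1:]
--                     if c not in '()' and (quoating or c != '"'))
--     return (method, value)
-- ===== Notes on version B (the rewrite author's own statement) =====
-- stated objective: simpler
-- what changed: Replaces A's single flag-driven character loop with a split-point decomposition: find the index of the first parenthesis, take the prefix as the method, and build the value as a filtered slice of the rest.
-- outside the precondition, e.g. on pre_parse('', False): A returns (False, False), B returns (False, False)
import Mathlib
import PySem

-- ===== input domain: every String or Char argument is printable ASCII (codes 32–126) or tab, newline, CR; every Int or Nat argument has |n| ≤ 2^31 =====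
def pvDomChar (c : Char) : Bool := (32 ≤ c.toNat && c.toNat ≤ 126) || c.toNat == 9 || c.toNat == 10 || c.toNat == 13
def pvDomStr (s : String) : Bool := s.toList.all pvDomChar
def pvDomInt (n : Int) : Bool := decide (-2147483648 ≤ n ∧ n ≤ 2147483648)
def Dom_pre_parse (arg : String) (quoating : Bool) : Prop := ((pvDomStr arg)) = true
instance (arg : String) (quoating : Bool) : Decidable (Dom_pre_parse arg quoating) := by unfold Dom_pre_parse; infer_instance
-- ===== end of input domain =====

-- B replaces A's flag-driven character loop by a split-point decomposition (prefix before
-- the first parenthesis = method, filtered remainder = value); objective: simpler.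

-- ===== PORT A =====
-- one step of A's 'for char in arg' loop over state (method, value, flag)
def pre_parse_step (quoating : Bool) (s : List Char × List Char × Bool) (c : Char) :
    List Char × List Char × Bool :=
  if c = '(' ∨ c = ')' then (s.1, s.2.1, true)
  else
    let v := if s.2.2 then (if ¬quoating ∧ c = '"' then s.2.1 else s.2.1 ++ [c]) else s.2.1
    let m := if s.2.2 then s.1 else s.1 ++ [c]
    (m, v, s.2.2)

def pre_parse (arg : String) (quoating : Bool) : String × String :=
  -- Python returns (False, False) on empty arg: not a pair of strings; excluded by Pre_
  if arg.toList = [] then ("", "")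
  else if PySem.Str.pyGet? arg (-1) = some ')' then
    let st := arg.toList.foldl (pre_parse_step quoating) ([], [], false)
    (String.mk st.1, String.mk st.2.1)
  else ("", "")

-- ===== PORT B =====
def pre_parse_alt (arg : String) (quoating : Bool) : String × String :=
  -- Python returns (False, False) on empty arg: excluded by Pre_
  if arg.toList = [] then ("", "")
  else if PySem.Str.pyGet? arg (-1) ≠ some ')' then ("", "")
  else
    let cs := arg.toList
    let i := cs.findIdx (fun c => c == '(' || c == ')')
    (String.mk (cs.take i),
     String.mk ((cs.drop (i + 1)).filter
       (fun c => !(c == '(' || c == ')') && (quoating || c != '"'))))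

-- ===== PRECONDITION & SPEC =====
-- Pre_ excludes only the empty string, on which Python A returns (False, False): not a
-- value of the declared type String × String.
def Pre_pre_parse (arg : String) (quoating : Bool) : Prop := arg ≠ ""
instance (arg : String) (quoating : Bool) : Decidable (Pre_pre_parse arg quoating) := by
  unfold Pre_pre_parse; infer_instance

def pvWitness_pre_parse : String × Bool := ("all User(\"x\")", false)

def Spec_pre_parse (arg : String) (quoating : Bool) (out : String × String) : Prop := out = pre_parse_alt arg quoating
instance (arg : String) (quoating : Bool) (out : String × String) : Decidable (Spec_pre_parse arg quoating out) := by unfold Spec_pre_parse; infer_instance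

-- ===== CLAIM (what is proved, stated in full; the proofs are below) =====
def Claim_equal_pre_parse : Prop := ∀ (arg : String) (quoating : Bool), Dom_pre_parse arg quoating → Pre_pre_parse arg quoating → Spec_pre_parse arg quoating (pre_parse arg quoating)

-- ===== LEMMAS AND PROOFS =====

-- the value filter both sides compute
def pvFilt (quoating : Bool) (cs : List Char) : List Char :=
  cs.filter (fun c => !(c == '(' || c == ')') && (quoating || c != '"'))

-- once the flag is true, A's loop only extends value by the filtered characters
theorem foldl_step_true (quoating : Bool) (cs : List Char) (m v : List Char) :
    cs.foldl (pre_parse_step quoating) (m, v, true) = (m, v ++ pvFilt quoating cs, true) := by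
  induction cs generalizing v with
  | nil => simp [pvFilt]
  | cons c t ih =>
    by_cases hp : c = '(' ∨ c = ')'
    · rcases hp with h | h <;> simp [pre_parse_step, h, ih, pvFilt, List.filter_cons]
    · push_neg at hp
      have hb : (c == '(' || c == ')') = false := by simp [hp.1, hp.2]
      by_cases hk : quoating = true ∨ c ≠ '"'
      · have hkb : (quoating || c != '"') = true := by rcases hk with h | h <;> simp [h]
        have hnq : ¬(quoating = false ∧ c = '"') := by
          rcases hk with h | h
          · simp [h]
          · tauto
        have hnp : ¬(c = '(' ∨ c = ')') := by tauto
        simp [pre_parse_step, hnp, hp, hnq, hb, hkb, ih, pvFilt, List.filter_cons]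
      · push_neg at hk
        have hQ : quoating = false := by simpa using hk.1
        subst hQ
        have hkb : ((false : Bool) || c != '"') = false := by simp [hk.2]
        have hnp : ¬(c = '(' ∨ c = ')') := by tauto
        simp [pre_parse_step, hnp, hp, hk.2, hb, hkb, ih, pvFilt, List.filter_cons]

-- before any parenthesis, A's loop extends method and leaves value alone
theorem foldl_step_false (quoating : Bool) (cs : List Char) (m v : List Char)
    (hany : cs.any (fun c => c == '(' || c == ')') = true) :
    cs.foldl (pre_parse_step quoating) (m, v, false) =
      (m ++ cs.take (cs.findIdx (fun c => c == '(' || c == ')')),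
       v ++ pvFilt quoating (cs.drop (cs.findIdx (fun c => c == '(' || c == ')') + 1)),
       true) := by
  induction cs generalizing m with
  | nil => simp at hany
  | cons c t ih =>
    by_cases hp : c = '(' ∨ c = ')'
    · have hb : (c == '(' || c == ')') = true := by rcases hp with h | h <;> simp [h]
      simp [pre_parse_step, hp, List.findIdx_cons, hb, foldl_step_true]
    · push_neg at hp
      have hb : (c == '(' || c == ')') = false := by simp [hp.1, hp.2]
      have hany' : t.any (fun c => c == '(' || c == ')') = true := by
        simpa [hb] using hany
      simp [pre_parse_step, hp.1, hp.2, List.findIdx_cons, hb, ih _ hany']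

theorem pre_parse_eq (arg : String) (quoating : Bool) (h : Pre_pre_parse arg quoating) :
    pre_parse arg quoating = pre_parse_alt arg quoating := by
  have hne : arg.toList ≠ [] := by
    intro hc; exact h (String.toList_eq_nil_iff.mp hc)
  unfold pre_parse pre_parse_alt
  simp only [PySem.Str.pyGet?_eq, PySem.Chars.pyGet?_eq_listPyGet?, hne, if_neg hne, ite_not]
  by_cases hlast : PySem.List.pyGet? arg.toList (-1) = some ')'
  · have hmem : ')' ∈ arg.toList := by
      rw [PySem.List.pyGet?_neg_one] at hlast
      exact List.mem_of_getLast? hlast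
    have hany : arg.toList.any (fun c => c == '(' || c == ')') = true :=
      List.any_eq_true.mpr ⟨')', hmem, by simp⟩
    simp [hlast, foldl_step_false quoating arg.toList [] [] hany, pvFilt]
  · simp [hlast]

-- ===== VERDICT (by name: the statement is the Claim_ definition above) =====
theorem pre_parse_spec : Claim_equal_pre_parse := by
  intro arg quoating _ hpre
  unfold Spec_pre_parse
  exact pre_parse_eq arg quoating hpre
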